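-- pv_equiv track=rewrite | github.com/FaustSJ/Python-Recursion-Path | sfaust3_p1.py | energy_helper
-- ===== SOURCE A (Python) =====
-- def width(grid):
-- 	return len(grid[0])
--
-- def height(grid):
-- 	return len(grid)
--
-- def energy_at(grid, r, c):
-- 	#given a grid of RGB triplets
-- 	#check if border node
-- 	leftR = 0
-- 	leftG = 0
-- 	leftB = 0
-- 	rightR = 0
-- 	rightG = 0
-- 	rightB = 0
-- 	upR = 0
-- 	upG = 0
-- 	upB = 0
-- 	downR = 0
-- 	downG = 0
-- 	downB = 0
--
-- 	#do we check up, down, or both?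
-- 	if r==0:
-- 		#check down while up wraps around
-- 		upR = grid[height(grid)-1][c][0]
-- 		upG = grid[height(grid)-1][c][1]
-- 		upB = grid[height(grid)-1][c][2]
-- 		downR = grid[r+1][c][0]
-- 		downG = grid[r+1][c][1]
-- 		downB = grid[r+1][c][2]
-- 	else:
-- 		if r==(height(grid)-1):
-- 			#check up while down wraps around
-- 			upR = grid[r-1][c][0]
-- 			upG = grid[r-1][c][1]
-- 			upB = grid[r-1][c][2]
-- 			downR = grid[0][c][0]
-- 			downG = grid[0][c][1]
-- 			downB = grid[0][c][2]
-- 		else: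
-- 			#check both
-- 			upR = grid[r-1][c][0]
-- 			upG = grid[r-1][c][1]
-- 			upB = grid[r-1][c][2]
-- 			downR = grid[r+1][c][0]
-- 			downG = grid[r+1][c][1]
-- 			downB = grid[r+1][c][2]
--
--
--
--
-- 	#do we check left, right, or both?
-- 	if c==0:
-- 		#check right while left wraps around
-- 		rightR = grid[r][c+1][0]
-- 		rightG = grid[r][c+1][1]
-- 		rightB = grid[r][c+1][2]
-- 		leftR = grid[r][width(grid)-1][0]
-- 		leftG = grid[r][width(grid)-1][1]
-- 		leftB = grid[r][width(grid)-1][2]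
-- 	else:
-- 		if c==(width(grid)-1):
-- 			#check left while right wraps around
-- 			rightR = grid[r][0][0]
-- 			rightG = grid[r][0][1]
-- 			rightB = grid[r][0][2]
-- 			leftR = grid[r][c-1][0]
-- 			leftG = grid[r][c-1][1]
-- 			leftB = grid[r][c-1][2]
-- 		else:
-- 			#check both
-- 			rightR = grid[r][c+1][0]
-- 			rightG = grid[r][c+1][1]
-- 			rightB = grid[r][c+1][2]
-- 			leftR = grid[r][c-1][0]
-- 			leftG = grid[r][c-1][1]
-- 			leftB = grid[r][c-1][2]
--
-- 	#now we calculte the energy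
-- 	rx = (rightR - leftR)**2
-- 	gx = (rightG - leftG)**2
-- 	bx = (rightB - leftB)**2
-- 	ry = (upR - downR)**2
-- 	gy = (upG - downG)**2
-- 	by = (upB - downB)**2
--
-- 	return (rx+gx+bx+ry+gy+by)
--
-- def energy_helper(grid, w, h, curR, curC, egrid):
-- 	if curR>=h:
-- 		return egrid
-- 	if curC>=w:
-- 		return energy_helper(grid, w, h, (curR+1), 0, egrid)
-- 	if curR==(height(egrid)):
-- 		egrid.append([])
-- 	egrid[curR].append(energy_at(grid, curR, curC))
-- 	return energy_helper(grid, w, h, curR, (curC+1), egrid)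
-- ===== SOURCE B (Python) =====
-- def energy_helper(grid, w, h, curR, curC, egrid):
--     # Iterative row-by-row rebuild (same in-place mutation of egrid as the
--     # recursive original); per-cell energy via modular wraparound arithmetic.
--     r = curR
--     while r < h:
--         start = curC if r == curR else 0
--         if start < w:
--             if r == len(egrid):
--                 egrid.append([])
--             row = egrid[r]
--             for c in range(start, w):
--                 row.append(energy_at(grid, r, c))
--         r += 1
--     return egrid
--
-- def energy_at(grid, r, c):
--     gh = len(grid)
--     gw = len(grid[0])
--     up = grid[(r - 1) % gh][c]
--     down = grid[(r + 1) % gh][c]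
--     row = grid[r]
--     left = row[(c - 1) % gw]
--     right = row[(c + 1) % gw]
--     return ((right[0] - left[0]) ** 2 + (right[1] - left[1]) ** 2
--             + (right[2] - left[2]) ** 2 + (up[0] - down[0]) ** 2
--             + (up[1] - down[1]) ** 2 + (up[2] - down[2]) ** 2)
-- ===== Notes on version B (the rewrite author's own statement) =====
-- stated objective: simpler
-- what changed: The tail recursion over (row, col) pairs becomes an iterative while-loop over rows with an inner range loop per row, and the 80-line four-way border if-cascade in energy_at is replaced by modular (% height, % width) wraparound indexing.
import Mathlib
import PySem

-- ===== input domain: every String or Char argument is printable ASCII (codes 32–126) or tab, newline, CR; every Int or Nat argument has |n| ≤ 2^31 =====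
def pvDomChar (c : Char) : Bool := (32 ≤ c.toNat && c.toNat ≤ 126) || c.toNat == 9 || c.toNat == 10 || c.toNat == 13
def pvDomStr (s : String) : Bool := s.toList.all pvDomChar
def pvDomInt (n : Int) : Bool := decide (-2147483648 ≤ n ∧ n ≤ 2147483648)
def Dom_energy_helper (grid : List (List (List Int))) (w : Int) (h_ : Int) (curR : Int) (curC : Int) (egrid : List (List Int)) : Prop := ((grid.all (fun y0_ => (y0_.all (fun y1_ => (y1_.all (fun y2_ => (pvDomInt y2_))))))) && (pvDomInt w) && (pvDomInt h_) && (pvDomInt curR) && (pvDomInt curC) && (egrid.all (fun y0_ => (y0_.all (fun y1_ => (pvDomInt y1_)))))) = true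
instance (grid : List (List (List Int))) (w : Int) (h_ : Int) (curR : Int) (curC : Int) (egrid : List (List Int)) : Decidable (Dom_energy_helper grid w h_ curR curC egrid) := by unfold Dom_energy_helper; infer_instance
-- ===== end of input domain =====

-- B replaces A's tail recursion by an iterative row loop with a per-row range fill and
-- replaces the 80-line border if-cascade of energy_at by modular wraparound arithmetic
-- (objective: simpler).  Both A and B mutate egrid in place identically; the equivalence
-- proved here is about the return value.

-- ===== PORT A =====
def width_ (grid : List (List (List Int))) : Int :=
  (((PySem.List.pyGet? grid 0).getD []).length : Int)

def height_ (grid : List (List (List Int))) : Int := (grid.length : Int)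

def px (grid : List (List (List Int))) (r c i : Int) : Int :=
  (PySem.List.pyGet? ((PySem.List.pyGet? ((PySem.List.pyGet? grid r).getD []) c).getD []) i).getD 0

def energy_at_A (grid : List (List (List Int))) (r c : Int) : Int :=
  let ud : Int × Int × Int × Int × Int × Int :=
    if r = 0 then
      (px grid (height_ grid - 1) c 0, px grid (height_ grid - 1) c 1, px grid (height_ grid - 1) c 2,
       px grid (r + 1) c 0, px grid (r + 1) c 1, px grid (r + 1) c 2)
    else if r = height_ grid - 1 then
      (px grid (r - 1) c 0, px grid (r - 1) c 1, px grid (r - 1) c 2,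
       px grid 0 c 0, px grid 0 c 1, px grid 0 c 2)
    else
      (px grid (r - 1) c 0, px grid (r - 1) c 1, px grid (r - 1) c 2,
       px grid (r + 1) c 0, px grid (r + 1) c 1, px grid (r + 1) c 2)
  let lr : Int × Int × Int × Int × Int × Int :=
    if c = 0 then
      (px grid r (c + 1) 0, px grid r (c + 1) 1, px grid r (c + 1) 2,
       px grid r (width_ grid - 1) 0, px grid r (width_ grid - 1) 1, px grid r (width_ grid - 1) 2)
    else if c = width_ grid - 1 then
      (px grid r 0 0, px grid r 0 1, px grid r 0 2,
       px grid r (c - 1) 0, px grid r (c - 1) 1, px grid r (c - 1) 2)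
    else
      (px grid r (c + 1) 0, px grid r (c + 1) 1, px grid r (c + 1) 2,
       px grid r (c - 1) 0, px grid r (c - 1) 1, px grid r (c - 1) 2)
  match ud, lr with
  | (uR, uG, uB, dR, dG, dB), (rR, rG, rB, lR, lG, lB) =>
    (rR - lR) ^ 2 + (rG - lG) ^ 2 + (rB - lB) ^ 2 +
    (uR - dR) ^ 2 + (uG - dG) ^ 2 + (uB - dB) ^ 2

def appendAt (e : List (List Int)) (r : Int) (x : Int) : List (List Int) :=
  e.modify r.toNat (fun row => row ++ [x])

def energy_helper (grid : List (List (List Int))) (w : Int) (h_ : Int) (curR : Int) (curC : Int) (egrid : List (List Int)) : List (List Int) :=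
  if h_ ≤ curR then egrid
  else if w ≤ curC then energy_helper grid w h_ (curR + 1) 0 egrid
  else
    let eg1 := if curR = (egrid.length : Int) then egrid ++ [[]] else egrid
    energy_helper grid w h_ curR (curC + 1) (appendAt eg1 curR (energy_at_A grid curR curC))
termination_by ((h_ - curR).toNat, (w - curC).toNat)
decreasing_by
  · apply Prod.Lex.left; omega
  · apply Prod.Lex.right' <;> omega

-- ===== PORT B =====
def energy_at_alt (grid : List (List (List Int))) (r c : Int) : Int :=
  let gh : Int := (grid.length : Int)
  let gw : Int := (((PySem.List.pyGet? grid 0).getD []).length : Int)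
  let up := (PySem.List.pyGet? ((PySem.List.pyGet? grid (PySem.Int.mod (r - 1) gh)).getD []) c).getD []
  let down := (PySem.List.pyGet? ((PySem.List.pyGet? grid (PySem.Int.mod (r + 1) gh)).getD []) c).getD []
  let row := (PySem.List.pyGet? grid r).getD []
  let left := (PySem.List.pyGet? row (PySem.Int.mod (c - 1) gw)).getD []
  let right := (PySem.List.pyGet? row (PySem.Int.mod (c + 1) gw)).getD []
  let g : List Int → Int → Int := fun p i => (PySem.List.pyGet? p i).getD 0
  (g right 0 - g left 0) ^ 2 + (g right 1 - g left 1) ^ 2 + (g right 2 - g left 2) ^ 2 +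
  (g up 0 - g down 0) ^ 2 + (g up 1 - g down 1) ^ 2 + (g up 2 - g down 2) ^ 2

def setAt (e : List (List Int)) (r : Int) (v : List Int) : List (List Int) :=
  e.set r.toNat v

def fillRow (grid : List (List (List Int))) (r : Int) (cs : List Int) (row : List Int) : List Int :=
  cs.foldl (fun acc c => acc ++ [energy_at_alt grid r c]) row

def bLoop (grid : List (List (List Int))) (w h_ curR curC r : Int) (egrid : List (List Int)) : List (List Int) :=
  if h_ ≤ r then egrid
  else
    let start := if r = curR then curC else 0
    let eg' :=
      if start < w then
        let e1 := if r = (egrid.length : Int) then egrid ++ [[]] else egrid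
        setAt e1 r (fillRow grid r (PySem.List.pyRange start w 1) ((PySem.List.pyGet? e1 r).getD []))
      else egrid
    bLoop grid w h_ curR curC (r + 1) eg'
termination_by (h_ - r).toNat
decreasing_by omega

def energy_helper_alt (grid : List (List (List Int))) (w : Int) (h_ : Int) (curR : Int) (curC : Int) (egrid : List (List Int)) : List (List Int) :=
  bLoop grid w h_ curR curC curR egrid

-- ===== PRECONDITION & SPEC =====
-- Pre_ is where the Python A returns normally: either no cell is ever visited (first
-- three disjuncts), or the grid is a rectangular image (at least 2 x 2) of RGB triplets,
-- the requested window fits inside it, and egrid has every row A will index.  It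
-- excludes ragged or undersized grids and out-of-range start rows, on which A surviving
-- a run depends on accidental in-range negative indexing and any returned value is as
-- defensible as any other.
def Pre_energy_helper (grid : List (List (List Int))) (w : Int) (h_ : Int) (curR : Int) (curC : Int) (egrid : List (List Int)) : Prop :=
  h_ ≤ curR
  ∨ (w ≤ 0 ∧ w ≤ curC)
  ∨ (w ≤ curC ∧ h_ ≤ curR + 1)
  ∨ (0 ≤ curR ∧ 1 - ((grid.getD 0 []).length : Int) ≤ curC
     ∧ w ≤ ((grid.getD 0 []).length : Int) ∧ 2 ≤ ((grid.getD 0 []).length : Int)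
     ∧ 2 ≤ (grid.length : Int) ∧ h_ ≤ (grid.length : Int)
     ∧ (∀ row ∈ grid, row.length = (grid.getD 0 []).length)
     ∧ (∀ row ∈ grid, ∀ p ∈ row, 3 ≤ p.length)
     ∧ ((curC < w ∧ curR ≤ (egrid.length : Int)) ∨ (w ≤ curC ∧ curR < (egrid.length : Int))))

instance (grid : List (List (List Int))) (w : Int) (h_ : Int) (curR : Int) (curC : Int) (egrid : List (List Int)) : Decidable (Pre_energy_helper grid w h_ curR curC egrid) := by
  unfold Pre_energy_helper; infer_instance

def pvWitness_energy_helper : List (List (List Int)) × Int × Int × Int × Int × List (List Int) :=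
  ([[[1, 2, 3], [4, 5, 6]], [[7, 8, 9], [0, 1, 2]]], 2, 2, 0, 0, [])

def Spec_energy_helper (grid : List (List (List Int))) (w : Int) (h_ : Int) (curR : Int) (curC : Int) (egrid : List (List Int)) (out : List (List Int)) : Prop := out = energy_helper_alt grid w h_ curR curC egrid
instance (grid : List (List (List Int))) (w : Int) (h_ : Int) (curR : Int) (curC : Int) (egrid : List (List Int)) (out : List (List Int)) : Decidable (Spec_energy_helper grid w h_ curR curC egrid out) := by unfold Spec_energy_helper; infer_instance

-- ===== CLAIM (what is proved, stated in full; the proofs are below) =====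
def Claim_equal_energy_helper : Prop := ∀ (grid : List (List (List Int))) (w : Int) (h_ : Int) (curR : Int) (curC : Int) (egrid : List (List Int)), Dom_energy_helper grid w h_ curR curC egrid → Pre_energy_helper grid w h_ curR curC egrid → Spec_energy_helper grid w h_ curR curC egrid (energy_helper grid w h_ curR curC egrid)

-- ===== LEMMAS AND PROOFS =====
theorem pyGet?_nonneg' {α : Type} (xs : List α) (i : Int) (hi : 0 ≤ i) :
    PySem.List.pyGet? xs i = xs[i.toNat]? := by
  rw [← Int.toNat_of_nonneg hi, PySem.List.pyGet?_natCast, Int.toNat_natCast]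

theorem pyGet?_wrap {α : Type} (xs : List α) (i W : Int) (hlen : (xs.length : Int) = W)
    (h1 : -W ≤ i) (h2 : i < W) (hW : 0 < W) :
    PySem.List.pyGet? xs (PySem.Int.mod i W) = PySem.List.pyGet? xs i := by
  rw [PySem.Int.mod_eq_emod_of_pos (b := W) (a := i) hW]
  by_cases hi : 0 ≤ i
  · rw [Int.emod_eq_of_lt hi h2]
  · have hm : i % W = i + W := by
      have h1' : (i + W * 1) % W = i % W := Int.add_mul_emod_self_left i W 1
      rw [mul_one] at h1'
      rw [← h1', Int.emod_eq_of_lt (by omega) (by omega)]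
    rw [hm, pyGet?_nonneg' _ _ (by omega)]
    have hk : i = -(((-i).toNat : Nat) : Int) := by omega
    rw [hk, PySem.List.pyGet?_neg_natCast _ _ (by omega) (by omega)]
    congr 1
    omega

theorem mod_val_neg (i W : Int) (hW : 0 < W) (h1 : -W ≤ i) (h2 : i < 0) : PySem.Int.mod i W = i + W := by
  rw [PySem.Int.mod_eq_emod_of_pos hW]
  have h1' := Int.add_mul_emod_self_left i W 1
  rw [mul_one] at h1'
  rw [← h1', Int.emod_eq_of_lt (by omega) (by omega)]

theorem set_modify {α : Type} (l : List α) (n : Nat) (f : α → α) (v : α) :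
    (l.modify n f).set n v = l.set n v := by
  apply List.ext_getElem?
  intro j
  by_cases hj : n = j
  · subst hj; simp [List.getElem?_set]
  · simp [List.getElem?_set, List.getElem?_modify, hj]

theorem energy_at_eq (grid : List (List (List Int))) (r c : Int)
    (hW2 : 2 ≤ ((grid.getD 0 []).length : Int))
    (hL2 : 2 ≤ (grid.length : Int))
    (hrect : ∀ row ∈ grid, row.length = (grid.getD 0 []).length)
    (hr0 : 0 ≤ r) (hrL : r < (grid.length : Int))
    (hc1 : 1 - ((grid.getD 0 []).length : Int) ≤ c) (hc2 : c < ((grid.getD 0 []).length : Int)) :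
    energy_at_A grid r c = energy_at_alt grid r c := by
  have hg0 : ((PySem.List.pyGet? grid 0).getD []) = grid.getD 0 [] := by
    rw [pyGet?_nonneg' _ _ le_rfl]
    cases grid with
    | nil => simp at hL2
    | cons a l => simp
  have hrowlen : ((((PySem.List.pyGet? grid r).getD []).length : Int)) = ((grid.getD 0 []).length : Int) := by
    rw [pyGet?_nonneg' _ _ hr0]
    have hlt : r.toNat < grid.length := by omega
    rw [List.getElem?_eq_getElem hlt]
    have := hrect (grid[r.toNat]) (List.getElem_mem hlt)
    simp [this]
  have hup : PySem.List.pyGet? grid (PySem.Int.mod (r - 1) (grid.length : Int)) =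
      (if r = 0 then PySem.List.pyGet? grid ((grid.length : Int) - 1) else PySem.List.pyGet? grid (r - 1)) := by
    by_cases h : r = 0
    · subst h
      rw [if_pos rfl, mod_val_neg _ _ (by omega) (by omega) (by omega)]
      congr 1
    · rw [if_neg h, pyGet?_wrap _ _ _ rfl (by omega) (by omega) (by omega)]
  have hdn : PySem.List.pyGet? grid (PySem.Int.mod (r + 1) (grid.length : Int)) =
      (if r = (grid.length : Int) - 1 then PySem.List.pyGet? grid 0 else PySem.List.pyGet? grid (r + 1)) := by
    by_cases h : r = (grid.length : Int) - 1
    · rw [if_pos h, h, show (grid.length : Int) - 1 + 1 = (grid.length : Int) from by ring,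
          PySem.Int.mod_eq_emod_of_pos (by omega), Int.emod_self]
    · rw [if_neg h, pyGet?_wrap _ _ _ rfl (by omega) (by omega) (by omega)]
  have hlf : PySem.List.pyGet? ((PySem.List.pyGet? grid r).getD []) (PySem.Int.mod (c - 1) ((grid.getD 0 []).length : Int)) =
      (if c = 0 then PySem.List.pyGet? ((PySem.List.pyGet? grid r).getD []) (((grid.getD 0 []).length : Int) - 1)
       else PySem.List.pyGet? ((PySem.List.pyGet? grid r).getD []) (c - 1)) := by
    by_cases h : c = 0
    · subst h
      rw [if_pos rfl, mod_val_neg _ _ (by omega) (by omega) (by omega)]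
      congr 1
    · rw [if_neg h, pyGet?_wrap _ _ _ hrowlen (by omega) (by omega) (by omega)]
  have hrt : PySem.List.pyGet? ((PySem.List.pyGet? grid r).getD []) (PySem.Int.mod (c + 1) ((grid.getD 0 []).length : Int)) =
      (if c = ((grid.getD 0 []).length : Int) - 1 then PySem.List.pyGet? ((PySem.List.pyGet? grid r).getD []) 0
       else PySem.List.pyGet? ((PySem.List.pyGet? grid r).getD []) (c + 1)) := by
    by_cases h : c = ((grid.getD 0 []).length : Int) - 1
    · rw [if_pos h, h, show ((grid.getD 0 []).length : Int) - 1 + 1 = ((grid.getD 0 []).length : Int) from by ring,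
          PySem.Int.mod_eq_emod_of_pos (by omega), Int.emod_self]
    · rw [if_neg h, pyGet?_wrap _ _ _ hrowlen (by omega) (by omega) (by omega)]
  rw [energy_at_A, energy_at_alt]
  simp only [width_, height_, hg0, hup, hdn, hlf, hrt, px]
  split_ifs <;> first | omega | rfl | (rw [hg0])

def rowStep (grid : List (List (List Int))) (w : Int) (r c : Int) (egrid : List (List Int)) : List (List Int) :=
  if c < w then
    let e1 := if r = (egrid.length : Int) then egrid ++ [[]] else egrid
    setAt e1 r (fillRow grid r (PySem.List.pyRange c w 1) ((PySem.List.pyGet? e1 r).getD []))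
  else egrid

theorem bLoop_step (grid : List (List (List Int))) (w h_ curR curC r : Int) (egrid : List (List Int))
    (hr : ¬ h_ ≤ r) :
    bLoop grid w h_ curR curC r egrid =
      bLoop grid w h_ curR curC (r + 1) (rowStep grid w r (if r = curR then curC else 0) egrid) := by
  rw [bLoop]
  simp only [if_neg hr]
  rfl

theorem rowStep_length (grid : List (List (List Int))) (w r c : Int) (egrid : List (List Int))
    (h0 : 0 ≤ r) (hle : r ≤ (egrid.length : Int)) (hc : c < w) :
    r + 1 ≤ ((rowStep grid w r c egrid).length : Int) := by
  rw [rowStep, if_pos hc]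
  by_cases h : r = (egrid.length : Int) <;> simp [setAt, h] <;> omega

theorem getD_appendAt (e1 : List (List Int)) (r : Int) (x : Int)
    (h0 : 0 ≤ r) (hlt : r.toNat < e1.length) :
    (PySem.List.pyGet? (appendAt e1 r x) r).getD [] = (PySem.List.pyGet? e1 r).getD [] ++ [x] := by
  rw [appendAt, pyGet?_nonneg' _ _ h0, pyGet?_nonneg' _ _ h0, List.getElem?_modify,
    List.getElem?_eq_getElem hlt]
  simp

theorem appendAt_eq_set (e1 : List (List Int)) (r : Int) (x : Int)
    (h0 : 0 ≤ r) (hlt : r.toNat < e1.length) :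
    appendAt e1 r x = setAt e1 r ((PySem.List.pyGet? e1 r).getD [] ++ [x]) := by
  rw [appendAt, setAt, List.modify_eq_set_get _ hlt, pyGet?_nonneg' _ _ h0,
    List.getElem?_eq_getElem hlt]
  rfl

theorem setAt_appendAt (e1 : List (List Int)) (r : Int) (x : Int) (v : List Int) :
    setAt (appendAt e1 r x) r v = setAt e1 r v := by
  rw [appendAt, setAt, setAt, set_modify]

theorem length_appendAt (e1 : List (List Int)) (r : Int) (x : Int) :
    (appendAt e1 r x).length = e1.length := by
  rw [appendAt, List.length_modify]

theorem row_lemma (grid : List (List (List Int))) (w h_ : Int)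
    (hW2 : 2 ≤ ((grid.getD 0 []).length : Int))
    (hL2 : 2 ≤ (grid.length : Int))
    (hrect : ∀ row ∈ grid, row.length = (grid.getD 0 []).length)
    (hwW : w ≤ ((grid.getD 0 []).length : Int))
    (hhL : h_ ≤ (grid.length : Int)) :
    ∀ (n : Nat) (c : Int) (egrid : List (List Int)) (r : Int), (w - c).toNat ≤ n → 0 ≤ r → r < h_ →
      1 - ((grid.getD 0 []).length : Int) ≤ c →
      r ≤ (egrid.length : Int) →
      energy_helper grid w h_ r c egrid = energy_helper grid w h_ (r + 1) 0 (rowStep grid w r c egrid) := by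
  intro n
  induction n with
  | zero =>
    intro c egrid r hn hr0 hrh hc hre
    have hcw : w ≤ c := by omega
    rw [energy_helper, if_neg (by omega), if_pos hcw, rowStep, if_neg (by omega)]
  | succ n ih =>
    intro c egrid r hn hr0 hrh hc hre
    by_cases hcw : w ≤ c
    · rw [energy_helper, if_neg (by omega), if_pos hcw, rowStep, if_neg (by omega)]
    · -- c < w : one cell appended, then IH
      rw [not_le] at hcw
      rw [energy_helper, if_neg (by omega), if_neg (by omega : ¬ w ≤ c)]
      simp only []
      set e1 := if r = (egrid.length : Int) then egrid ++ [[]] else egrid with he1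
      have hlt : r.toNat < e1.length := by
        rw [he1]; by_cases h : r = (egrid.length : Int) <;> simp [h] <;> omega
      set x := energy_at_A grid r c with hx
      have hxalt : x = energy_at_alt grid r c := by
        rw [hx]
        exact energy_at_eq grid r c hW2 hL2 hrect hr0 (by omega) hc (by omega)
      have hre2 : r ≤ ((appendAt e1 r x).length : Int) := by
        rw [length_appendAt]; omega
      rw [ih (c + 1) (appendAt e1 r x) r (by omega) hr0 hrh (by omega) hre2]
      congr 1
      -- rowStep r (c+1) (appendAt e1 r x) = rowStep r c egrid
      have hrange : PySem.List.pyRange c w 1 = c :: PySem.List.pyRange (c + 1) w 1 :=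
        PySem.List.pyRange_one_cons hcw
      by_cases hc1 : c + 1 < w
      · rw [rowStep, if_pos hc1, rowStep, if_pos hcw]
        have hne : ¬ r = ((appendAt e1 r x).length : Int) := by
          rw [length_appendAt]; omega
        simp only [if_neg hne, ← he1]
        rw [setAt_appendAt, getD_appendAt _ _ _ hr0 hlt]
        simp only [fillRow, hrange, List.foldl_cons, ← hxalt]
      · rw [rowStep, if_neg hc1, rowStep, if_pos hcw]
        have hnil : PySem.List.pyRange (c + 1) w 1 = [] := PySem.List.pyRange_one_eq_nil (by omega)
        simp only [fillRow, hrange, hnil, List.foldl_cons, List.foldl_nil, ← hxalt]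
        rw [appendAt_eq_set _ _ _ hr0 hlt]

theorem outer_lemma (grid : List (List (List Int))) (w h_ curR curC : Int)
    (hW2 : 2 ≤ ((grid.getD 0 []).length : Int))
    (hL2 : 2 ≤ (grid.length : Int))
    (hrect : ∀ row ∈ grid, row.length = (grid.getD 0 []).length)
    (hwW : w ≤ ((grid.getD 0 []).length : Int))
    (hhL : h_ ≤ (grid.length : Int))
    (hcW : 1 - ((grid.getD 0 []).length : Int) ≤ curC) :
    ∀ (n : Nat) (r : Int) (egrid : List (List Int)), (h_ - r).toNat ≤ n → curR ≤ r → 0 ≤ r →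
      (h_ ≤ r ∨ (((if r = curR then curC else 0) < w → r ≤ (egrid.length : Int)) ∧
        (¬ (if r = curR then curC else 0) < w → (w ≤ 0 ∨ r + 1 ≤ (egrid.length : Int) ∨ h_ ≤ r + 1)))) →
      energy_helper grid w h_ r (if r = curR then curC else 0) egrid = bLoop grid w h_ curR curC r egrid := by
  intro n
  induction n with
  | zero =>
    intro r egrid hn hcr hr0 hH
    have hhr : h_ ≤ r := by omega
    rw [energy_helper, if_pos hhr, bLoop, if_pos hhr]
  | succ n ih =>
    intro r egrid hn hcr hr0 hH
    by_cases hhr : h_ ≤ r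
    · rw [energy_helper, if_pos hhr, bLoop, if_pos hhr]
    · rcases hH with hH | ⟨hH1, hH2⟩
      · omega
      rw [bLoop_step _ _ _ _ _ _ _ hhr]
      set start := if r = curR then curC else 0 with hst
      have hstart1 : 1 - ((grid.getD 0 []).length : Int) ≤ start := by
        rw [hst]; split_ifs <;> omega
      have hnext : (if r + 1 = curR then curC else 0) = 0 := if_neg (by omega)
      by_cases hsw : start < w
      · have hre := hH1 hsw
        rw [row_lemma grid w h_ hW2 hL2 hrect hwW hhL ((w - start).toNat) start egrid r le_rfl hr0 (by omega) hstart1 hre]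
        have := ih (r + 1) (rowStep grid w r start egrid) (by omega) (by omega) (by omega)
          (Or.inr ⟨fun _ => by
              have := rowStep_length grid w r start egrid hr0 hre hsw
              omega,
            fun hnw => by
              rw [hnext] at hnw; left; omega⟩)
        rw [hnext] at this
        exact this
      · -- row skipped
        rw [energy_helper, if_neg hhr, if_pos (by omega)]
        have heg : rowStep grid w r start egrid = egrid := by rw [rowStep, if_neg hsw]
        rw [heg]
        have := ih (r + 1) egrid (by omega) (by omega) (by omega)
          (by
            rcases hH2 hsw with h | h | h
            · exact Or.inr ⟨fun hw' => by rw [hnext] at hw'; omega, fun _ => Or.inl h⟩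
            · exact Or.inr ⟨fun _ => by omega, fun hnw => by rw [hnext] at hnw; left; omega⟩
            · exact Or.inl h)
        rw [hnext] at this
        exact this

theorem skip_all_A (grid : List (List (List Int))) (w h_ : Int) (hw : w ≤ 0) :
    ∀ (n : Nat) (r c : Int) (egrid : List (List Int)), (h_ - r).toNat ≤ n → w ≤ c →
      energy_helper grid w h_ r c egrid = egrid := by
  intro n
  induction n with
  | zero =>
    intro r c egrid hn hc
    by_cases hhr : h_ ≤ r
    · rw [energy_helper, if_pos hhr]
    · omega
  | succ n ih =>
    intro r c egrid hn hc
    by_cases hhr : h_ ≤ r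
    · rw [energy_helper, if_pos hhr]
    · rw [energy_helper, if_neg hhr, if_pos hc]
      exact ih (r + 1) 0 egrid (by omega) (by omega)

theorem skip_all_B (grid : List (List (List Int))) (w h_ curR curC : Int) (hw : w ≤ 0) (hc : w ≤ curC) :
    ∀ (n : Nat) (r : Int) (egrid : List (List Int)), (h_ - r).toNat ≤ n →
      bLoop grid w h_ curR curC r egrid = egrid := by
  intro n
  induction n with
  | zero =>
    intro r egrid hn
    by_cases hhr : h_ ≤ r
    · rw [bLoop, if_pos hhr]
    · omega
  | succ n ih =>
    intro r egrid hn
    by_cases hhr : h_ ≤ r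
    · rw [bLoop, if_pos hhr]
    · rw [bLoop_step _ _ _ _ _ _ _ hhr]
      have : rowStep grid w r (if r = curR then curC else 0) egrid = egrid := by
        rw [rowStep, if_neg (by split_ifs <;> omega)]
      rw [this]
      exact ih (r + 1) egrid (by omega)

-- ===== VERDICT (by name: the statement is the Claim_ definition above) =====
theorem energy_helper_spec : Claim_equal_energy_helper := by
  intro grid w h_ curR curC egrid _hdom hpre
  unfold Spec_energy_helper
  rcases hpre with h1 | ⟨h2a, h2b⟩ | ⟨h3a, h3b⟩ | ⟨hr0, hc1, hwW, hW2, hL2, hhL, hrect, _hpx, hE⟩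
  · rw [energy_helper, if_pos h1, energy_helper_alt, bLoop, if_pos h1]
  · rw [energy_helper_alt,
        skip_all_A grid w h_ h2a ((h_ - curR).toNat) curR curC egrid le_rfl h2b,
        skip_all_B grid w h_ curR curC h2a h2b ((h_ - curR).toNat) curR egrid le_rfl]
  · by_cases hhr : h_ ≤ curR
    · rw [energy_helper, if_pos hhr, energy_helper_alt, bLoop, if_pos hhr]
    · rw [energy_helper, if_neg hhr, if_pos h3a, energy_helper, if_pos (by omega : h_ ≤ curR + 1),
          energy_helper_alt, bLoop_step _ _ _ _ _ _ _ hhr]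
      have hskip : rowStep grid w curR (if curR = curR then curC else 0) egrid = egrid := by
        rw [if_pos rfl, rowStep, if_neg (by omega)]
      rw [hskip, bLoop, if_pos (by omega)]
  · have hcc : (if curR = curR then curC else 0) = curC := if_pos rfl
    have hmain := outer_lemma grid w h_ curR curC hW2 hL2 hrect hwW hhL hc1
      ((h_ - curR).toNat) curR egrid le_rfl le_rfl hr0
      (Or.inr ⟨fun hw' => by
          rcases hE with ⟨_, h⟩ | ⟨h, _⟩
          · exact h
          · rw [hcc] at hw'; omega,
        fun hnw => by
          rcases hE with ⟨h, _⟩ | ⟨_, h⟩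
          · rw [hcc] at hnw; omega
          · exact Or.inr (Or.inl (by omega))⟩)
    rw [hcc] at hmain
    rw [energy_helper_alt]
    exact hmain
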